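-- pv_equiv track=rewrite | github.com/imkhoibui/rosalind | rosalind_markdowns/scratch.py | genome_assembly
-- ===== SOURCE A (Python) =====
-- def overlap(seq_1, seq_2):
--     max_overlap = 0
--
--     min_len = min(len(seq_1), len(seq_2))
--     for i in range(1, min_len + 1):
--         if seq_1[-i:] == seq_2[:i]:
--             if i > max_overlap:
--                 max_overlap = i
--
--     return max_overlap
--
-- def genome_assembly(seqs):
--     while len(seqs) > 1:
--         max_overlap = 0
--         best_pair = (0, 0)
--         superstring = ""
--
--         for i in range(len(seqs)):
--             for j in range(len(seqs)):
--                 if i != j: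
--                     overlap_length = overlap(seqs[i], seqs[j])
--                     if overlap_length > max_overlap:
--                         max_overlap = overlap_length
--                         best_pair = (i, j)
--                         superstring = seqs[i] + seqs[j][overlap_length:]
--         i, j = best_pair
--         seqs[i] = superstring
--         seqs.pop(j)
--
--     return seqs[0]
-- ===== SOURCE B (Python) =====
-- def _prefix_function(p):
--     # KMP failure table: pi[q] = length of the longest proper border of p[:q+1]
--     pi = [0] * len(p)
--     k = 0
--     for q in range(1, len(p)):
--         c = p[q]
--         while k > 0 and p[k] != c:
--             k = pi[k - 1]
--         if p[k] == c:
--             k += 1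
--         pi[q] = k
--     return pi
--
--
-- def _overlap(s1, s2):
--     # longest prefix of s2 that is a suffix of s1, via the KMP automaton of s2 run over s1
--     if not s2:
--         return 0
--     pi = _prefix_function(s2)
--     k = 0
--     for c in s1:
--         if k == len(s2):
--             k = pi[k - 1]
--         while k > 0 and s2[k] != c:
--             k = pi[k - 1]
--         if s2[k] == c:
--             k += 1
--     return k
--
--
-- def genome_assembly(seqs):
--     work = list(seqs)
--     while len(work) > 1:
--         o, bi, bj = 0, 0, 0
--         for i in range(len(work)):
--             for j in range(len(work)):
--                 if i != j:
--                     v = _overlap(work[i], work[j])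
--                     if v > o:
--                         o, bi, bj = v, i, j
--         merged = work[bi] + work[bj][o:]
--         work = [merged if k == bi else work[k] for k in range(len(work)) if k != bj]
--     return work[0]
-- ===== Notes on version B (the rewrite author's own statement) =====
-- stated objective: alternative
-- what changed: B computes each pairwise overlap by running a KMP prefix-function automaton of the second string over the first, instead of A's per-candidate-length slice comparisons, and rebuilds the shrinking list functionally instead of A's in-place set-and-pop.
import Mathlib
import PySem

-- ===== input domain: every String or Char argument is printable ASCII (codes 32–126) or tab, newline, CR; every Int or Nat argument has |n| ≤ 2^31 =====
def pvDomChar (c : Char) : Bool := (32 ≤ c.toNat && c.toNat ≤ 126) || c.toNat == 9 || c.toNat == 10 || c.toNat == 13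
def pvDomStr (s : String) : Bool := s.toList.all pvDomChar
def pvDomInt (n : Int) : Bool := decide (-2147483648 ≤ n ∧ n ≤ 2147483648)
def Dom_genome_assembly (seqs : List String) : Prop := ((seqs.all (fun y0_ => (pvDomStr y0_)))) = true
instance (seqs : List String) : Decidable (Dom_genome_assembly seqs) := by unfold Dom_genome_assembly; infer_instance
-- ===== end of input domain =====

-- B computes each pairwise overlap with a KMP prefix-function automaton instead of A's
-- per-candidate-length slice comparisons, and rebuilds the shrinking list functionally instead of
-- set-and-pop; A mutates its argument in place (pop/index assignment), B does not — the
-- equivalence proved here is about the RETURN value only.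

-- ===== PORT A =====
-- strings are handled as their character lists (String.toList at entry, String.ofList at exit);
-- PySem.List.slice on the char list is exactly Python's string slicing

-- overlap(seq_1, seq_2): loop i = 1 .. min_len, keep the largest i with seq_1[-i:] == seq_2[:i]
def ovA (s1 s2 : List Char) : Int :=
  let minLen : Int := min (s1.length : Int) (s2.length : Int)
  (PySem.List.pyRange 1 (minLen + 1) 1).foldl
    (fun maxOv i =>
      if PySem.List.slice s1 (some (-i)) none = PySem.List.slice s2 none (some i) then
        (if i > maxOv then i else maxOv)
      else maxOv) 0

-- one iteration of A's while-loop: the i/j double loop (range(len(seqs)) over Nat indices,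
-- exact since the indices are non-negative), then seqs[i] = superstring; seqs.pop(j)
def stepA (s : List (List Char)) : List (List Char) :=
  let n := s.length
  let st :=
    (List.range n).foldl
      (fun (st : Int × (Nat × Nat) × List Char) i =>
        (List.range n).foldl
          (fun st j =>
            if i ≠ j then
              let ol := ovA (s.getD i []) (s.getD j [])
              if ol > st.1 then
                (ol, (i, j), s.getD i [] ++ PySem.List.slice (s.getD j []) (some ol) none)
              else st
            else st) st)
      (0, (0, 0), [])
  let i := st.2.1.1
  let j := st.2.1.2
  (s.set i st.2.2).eraseIdx j    -- seqs[i] = superstring; seqs.pop(j) (j always in range here)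

-- while len(seqs) > 1: each pass shortens the list by one, so seqs.length passes suffice exactly
def loopA : Nat → List (List Char) → List (List Char)
  | 0, s => s
  | fuel + 1, s => if 1 < s.length then loopA fuel (stepA s) else s

def genome_assembly (seqs : List String) : String :=
  let s := loopA seqs.length (seqs.map String.toList)
  String.ofList (PySem.List.pyGetD s 0 [])   -- return seqs[0]; in range under Pre_

-- ===== PORT B =====
-- _prefix_function's inner `while k > 0 and p[k] != c: k = pi[k-1]`: each step strictly
-- decreases k, so k itself is enough fuel (at fuel 0 we have k = 0 and the loop is done)
def fallB (pi : List Nat) (p : List Char) (c : Char) : Nat → Nat → Nat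
  | 0, k => k
  | fuel + 1, k =>
    if k > 0 ∧ p.getD k 'a' ≠ c then fallB pi p c fuel (pi.getD (k - 1) 0) else k

-- _prefix_function(p): pi[0] = 0, then for q in range(1, len(p)) extend with the next value
def prefixFun (p : List Char) : List Nat :=
  if p = [] then []
  else
    ((List.range' 1 (p.length - 1)).foldl
      (fun (st : List Nat × Nat) q =>
        let c := p.getD q 'a'
        let k := fallB st.1 p c st.2 st.2
        let k' := if p.getD k 'a' = c then k + 1 else k
        (st.1 ++ [k'], k'))
      ([0], 0)).1

-- _overlap(s1, s2): run the KMP automaton of s2 over s1; the final state is the answer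
def ovB (s1 s2 : List Char) : Nat :=
  if s2 = [] then 0
  else
    let pi := prefixFun s2
    s1.foldl
      (fun k c =>
        let k₁ := if k = s2.length then pi.getD (k - 1) 0 else k
        let k₂ := fallB pi s2 c k₁ k₁
        if s2.getD k₂ 'a' = c then k₂ + 1 else k₂) 0

-- one pass of B: best pair by the same first-strictly-greater rule, then rebuild the list
def stepB (w : List (List Char)) : List (List Char) :=
  let n := w.length
  let st :=
    (List.range n).foldl
      (fun (st : Nat × Nat × Nat) i =>
        (List.range n).foldl
          (fun st j =>
            if i ≠ j then
              let v := ovB (w.getD i []) (w.getD j [])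
              if v > st.1 then (v, i, j) else st
            else st) st)
      (0, 0, 0)
  let o := st.1
  let bi := st.2.1
  let bj := st.2.2
  let merged := w.getD bi [] ++ (w.getD bj []).drop o
  (List.range n).filterMap
    (fun k => if k = bj then none else some (if k = bi then merged else w.getD k []))

def loopB : Nat → List (List Char) → List (List Char)
  | 0, w => w
  | fuel + 1, w => if 1 < w.length then loopB fuel (stepB w) else w

def genome_assembly_alt (seqs : List String) : String :=
  let w := loopB seqs.length (seqs.map String.toList)
  String.ofList (w.getD 0 [])   -- return work[0]; in range under Pre_

-- ===== PRECONDITION & SPEC =====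
-- Pre_ excludes only the empty list, on which A's final seqs[0] raises IndexError
def Pre_genome_assembly (seqs : List String) : Prop := seqs ≠ []
instance (seqs : List String) : Decidable (Pre_genome_assembly seqs) := by
  unfold Pre_genome_assembly; infer_instance

def pvWitness_genome_assembly : List String := ["ATTAGACCTG", "CCTGCCGGAA", "AGACCTGCCG", "GCCGGAATAC"]

def Spec_genome_assembly (seqs : List String) (out : String) : Prop := out = genome_assembly_alt seqs
instance (seqs : List String) (out : String) : Decidable (Spec_genome_assembly seqs out) := by
  unfold Spec_genome_assembly; infer_instance

-- ===== CLAIM (what is proved, stated in full; the proofs are below) =====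
def Claim_equal_genome_assembly : Prop :=
  ∀ (seqs : List String), Dom_genome_assembly seqs → Pre_genome_assembly seqs →
    Spec_genome_assembly seqs (genome_assembly seqs)

-- ===== LEMMAS AND PROOFS =====
-- ---------- generic helpers ----------

-- two greatest-element searches over possibly different bounds/predicates agree when the
-- positive satisfying sets agree
theorem fgCongr {P Q : Nat → Prop} [DecidablePred P] [DecidablePred Q] {n m : Nat}
    (h : ∀ x, 0 < x → ((x ≤ n ∧ P x) ↔ (x ≤ m ∧ Q x))) :
    Nat.findGreatest P n = Nat.findGreatest Q m := by
  have key : ∀ {P' Q' : Nat → Prop} [DecidablePred P'] [DecidablePred Q'] {n' m' : Nat},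
      (∀ x, 0 < x → ((x ≤ n' ∧ P' x) → (x ≤ m' ∧ Q' x))) →
      Nat.findGreatest P' n' ≤ Nat.findGreatest Q' m' := by
    intro P' Q' _ _ n' m' h'
    rcases Nat.eq_zero_or_pos (Nat.findGreatest P' n') with h0 | hpos
    · simp [h0]
    · obtain ⟨hle, hP, -⟩ := Nat.findGreatest_eq_iff.mp (rfl :
        Nat.findGreatest P' n' = Nat.findGreatest P' n')
      obtain ⟨hm, hQ⟩ := h' _ hpos ⟨hle, hP (by omega)⟩
      exact Nat.le_findGreatest hm hQ
  exact le_antisymm (key fun x hx hxP => (h x hx).mp hxP) (key fun x hx hxQ => (h x hx).mpr hxQ)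

theorem suffix_snoc_suffix_snoc {x y : List Char} {a b : Char} :
    x ++ [a] <:+ y ++ [b] ↔ a = b ∧ x <:+ y := by
  rw [← List.reverse_prefix, ← List.reverse_prefix (l₁ := x)]
  simp only [List.reverse_append, List.reverse_cons, List.reverse_nil, List.nil_append,
    List.singleton_append, List.cons_prefix_cons]

theorem take_snoc_getD {p : List Char} {m : Nat} (h : m < p.length) :
    p.take (m + 1) = p.take m ++ [p.getD m 'a'] := by
  rw [List.take_add_one, List.getElem?_eq_getElem h, List.getD_eq_getElem p 'a' h]
  rfl

-- a suffix of a suffix of u that both are prefixes of p: being a suffix of u is the same as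
-- being a suffix of the longer prefix
theorem chain_suffix {p u : List Char} {k m : Nat} (hk : k ≤ p.length)
    (hku : p.take k <:+ u) (hm : m ≤ k) :
    (p.take m <:+ u ↔ p.take m <:+ p.take k) := by
  constructor
  · intro hmu
    apply List.suffix_of_suffix_length_le hmu hku
    simp only [List.length_take]
    omega
  · intro hmk
    exact hmk.trans hku

-- ---------- specification-side definitions ----------

-- the candidate overlaps: prefixes of p of length m that end u
abbrev Bm (p u : List Char) (m : Nat) : Prop := m ≤ p.length ∧ p.take m <:+ u

-- the value both overlap computations return: the greatest candidate
def ovN (s1 p : List Char) : Nat := Nat.findGreatest (Bm p s1) p.length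

-- greatest proper border of p.take k
abbrev mpbP (p : List Char) (k m : Nat) : Prop := m < k ∧ p.take m <:+ p.take k
def mpb (p : List Char) (k : Nat) : Nat := Nat.findGreatest (mpbP p k) k

-- what fallB searches for: the greatest border of p.take k whose next character matches c
abbrev fallQ (p : List Char) (c : Char) (k m : Nat) : Prop :=
  m ≤ k ∧ p.take m <:+ p.take k ∧ (m = 0 ∨ p.getD m 'a' = c)

theorem mpb_lt {p : List Char} {k : Nat} (hk : 0 < k) : mpb p k < k := by
  rcases Nat.eq_zero_or_pos (mpb p k) with h0 | hpos
  · omega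
  · obtain ⟨-, hP, -⟩ := Nat.findGreatest_eq_iff.mp (rfl : mpb p k = mpb p k)
    exact (hP (by omega)).1

theorem mpb_border (p : List Char) (k : Nat) : p.take (mpb p k) <:+ p.take k := by
  rcases Nat.eq_zero_or_pos (mpb p k) with h0 | hpos
  · simp [h0]
  · obtain ⟨-, hP, -⟩ := Nat.findGreatest_eq_iff.mp (rfl : mpb p k = mpb p k)
    exact (hP (by omega)).2

theorem mpb_max {p : List Char} {k m : Nat} (h1 : m < k) (h2 : p.take m <:+ p.take k) :
    m ≤ mpb p k := Nat.le_findGreatest (le_of_lt h1) ⟨h1, h2⟩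

-- proper borders of p.take k are exactly the borders of p.take (mpb p k)
theorem border_chain {p : List Char} {k m : Nat} (hk : k ≤ p.length) (hk0 : 0 < k) (hm : m < k) :
    (p.take m <:+ p.take k ↔ m ≤ mpb p k ∧ p.take m <:+ p.take (mpb p k)) := by
  constructor
  · intro h
    have hle : m ≤ mpb p k := mpb_max hm h
    refine ⟨hle, ?_⟩
    have hkp : mpb p k ≤ p.length := le_trans (le_of_lt (mpb_lt hk0)) hk
    have := chain_suffix (u := p.take k) hkp ?side hle
    · exact this.mp h
    · exact mpb_border p k
  · rintro ⟨hle, h⟩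
    exact h.trans (mpb_border p k)

-- ---------- fallB computes the greatest matching border ----------

theorem fallB_spec {p : List Char} {pi : List Nat} {c : Char} {K : Nat}
    (hpi : ∀ i, i < K → pi.getD i 0 = mpb p (i + 1)) :
    ∀ fuel k, k ≤ fuel → k ≤ K → k ≤ p.length →
      fallB pi p c fuel k = Nat.findGreatest (fallQ p c k) k := by
  intro fuel
  induction fuel with
  | zero =>
    intro k hf _ _
    have hk0 : k = 0 := Nat.le_zero.mp hf
    subst hk0
    simp [fallB]
  | succ fuel ih =>
    intro k hf hK hp
    by_cases hk0 : k = 0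
    · subst hk0; simp [fallB]
    · by_cases hc : p.getD k 'a' = c
      · have hc' : p[k]?.getD 'a' = c := by simpa [List.getD] using hc
        have : fallB pi p c (fuel + 1) k = k := by simp [fallB, hc']
        rw [this]
        refine le_antisymm (Nat.le_findGreatest le_rfl ⟨le_rfl, List.suffix_refl _, Or.inr hc⟩)
          (Nat.findGreatest_le k)
      · have hstep : fallB pi p c (fuel + 1) k =
            fallB pi p c fuel (pi.getD (k - 1) 0) := by
          have hc' : ¬ p[k]?.getD 'a' = c := by simpa [List.getD] using hc
          simp [fallB, List.getD, hc', Nat.pos_of_ne_zero hk0]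
        have hpik : pi.getD (k - 1) 0 = mpb p k := by
          have := hpi (k - 1) (by omega)
          rwa [Nat.sub_add_cancel (Nat.pos_of_ne_zero hk0)] at this
        have hkpos : 0 < k := Nat.pos_of_ne_zero hk0
        have hmlt : mpb p k < k := mpb_lt hkpos
        rw [hstep, hpik, ih (mpb p k) (by omega) (by omega) (by omega)]
        apply fgCongr
        intro x hx
        constructor
        · rintro ⟨hxm, -, hsuf, hm⟩
          have hxlt : x < k := lt_of_le_of_lt hxm hmlt
          exact ⟨le_of_lt hxlt, le_of_lt hxlt,
            (border_chain hp hkpos hxlt).mpr ⟨hxm, hsuf⟩, hm⟩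
        · rintro ⟨hxk, -, hsuf, hm⟩
          have hxm : x ≠ k := by
            rintro rfl
            rcases hm with h0 | h0
            · omega
            · exact hc h0
          have hxlt : x < k := lt_of_le_of_ne hxk hxm
          obtain ⟨h1, h2⟩ := (border_chain hp hkpos hxlt).mp hsuf
          exact ⟨h1, h1, h2, hm⟩

theorem mpb_one (p : List Char) : mpb p 1 = 0 := by
  rw [mpb, Nat.findGreatest_succ, Nat.findGreatest_zero]
  simp [mpbP]

-- shared endgame of the prefix-function step and the automaton step: the new greatest value,
-- computed from the fallB search below k₁
theorem fg_extend {T : Nat → Prop} [DecidablePred T] {p : List Char} {c : Char} {k₁ N : Nat}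
    (hk : k₁ < N)
    (hbij : ∀ x, (x + 1 ≤ N ∧ T (x + 1)) ↔ (x ≤ k₁ ∧ p.take x <:+ p.take k₁ ∧ p.getD x 'a' = c)) :
    Nat.findGreatest T N =
      (if p.getD (Nat.findGreatest (fallQ p c k₁) k₁) 'a' = c
       then Nat.findGreatest (fallQ p c k₁) k₁ + 1
       else Nat.findGreatest (fallQ p c k₁) k₁) := by
  set r := Nat.findGreatest (fallQ p c k₁) k₁ with hr
  have r_le : r ≤ k₁ := Nat.findGreatest_le k₁
  have r_spec : r ≠ 0 → fallQ p c k₁ r :=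
    (Nat.findGreatest_eq_iff.mp hr.symm).2.1
  have r_suf : p.take r <:+ p.take k₁ := by
    by_cases h0 : r = 0
    · simp [h0]
    · exact (r_spec h0).2.1
  by_cases hc : p.getD r 'a' = c
  · rw [if_pos hc]
    apply Nat.findGreatest_eq_iff.mpr
    refine ⟨by omega, fun _ => ((hbij r).mpr ⟨r_le, r_suf, hc⟩).2, ?_⟩
    intro n hgt hle hT
    obtain ⟨x, rfl⟩ : ∃ x, n = x + 1 := ⟨n - 1, by omega⟩
    obtain ⟨hx1, hx2, hx3⟩ := (hbij x).mp ⟨hle, hT⟩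
    have : x ≤ r := Nat.le_findGreatest hx1 ⟨hx1, hx2, Or.inr hx3⟩
    omega
  · have hr0 : r = 0 := by
      by_contra h0
      rcases (r_spec h0).2.2 with h | h
      · exact h0 h
      · exact hc h
    rw [if_neg hc, hr0]
    apply Nat.findGreatest_eq_iff.mpr
    refine ⟨Nat.zero_le _, by simp, ?_⟩
    intro n hgt hle hT
    obtain ⟨x, rfl⟩ : ∃ x, n = x + 1 := ⟨n - 1, by omega⟩
    obtain ⟨hx1, hx2, hx3⟩ := (hbij x).mp ⟨hle, hT⟩
    have : x ≤ r := Nat.le_findGreatest hx1 ⟨hx1, hx2, Or.inr hx3⟩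
    rw [hr0] at this
    interval_cases x
    rw [hr0] at hc
    exact hc hx3

-- the prefix-function recurrence: the next value from the previous one
theorem mpb_succ {p : List Char} {q : Nat} (hq1 : 1 ≤ q) (hq : q < p.length) :
    mpb p (q + 1) =
      (if p.getD (Nat.findGreatest (fallQ p (p.getD q 'a') (mpb p q)) (mpb p q)) 'a' = p.getD q 'a'
       then Nat.findGreatest (fallQ p (p.getD q 'a') (mpb p q)) (mpb p q) + 1
       else Nat.findGreatest (fallQ p (p.getD q 'a') (mpb p q)) (mpb p q)) := by
  set c := p.getD q 'a' with hc
  set k0 := mpb p q with hk0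
  have hk0q : k0 < q := mpb_lt (by omega)
  apply fg_extend (by omega)
  intro x
  constructor
  · rintro ⟨hxq, hlt, hsuf⟩
    have hxltp : x < p.length := by omega
    rw [take_snoc_getD hq, take_snoc_getD hxltp] at hsuf
    obtain ⟨hxc, hsuf'⟩ := suffix_snoc_suffix_snoc.mp hsuf
    have hxq' : x < q := by omega
    obtain ⟨h1, h2⟩ := (border_chain (le_of_lt hq) (by omega) hxq').mp hsuf'
    exact ⟨h1, h2, hxc⟩
  · rintro ⟨hxk, hsuf, hxc⟩
    have hxq' : x < q := by omega
    have hxltp : x < p.length := by omega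
    have hsufq : p.take x <:+ p.take q :=
      (border_chain (le_of_lt hq) (by omega) hxq').mpr ⟨hxk, hsuf⟩
    refine ⟨by omega, ⟨by omega, ?_⟩⟩
    rw [take_snoc_getD hq, take_snoc_getD hxltp]
    exact suffix_snoc_suffix_snoc.mpr ⟨hxc, hsufq⟩

-- ---------- prefixFun is the table of greatest proper borders ----------

theorem pf_inv (p : List Char) (hp : p ≠ []) :
    ∀ t, t ≤ p.length - 1 →
      (((List.range' 1 t).foldl
        (fun (st : List Nat × Nat) q =>
          let c := p.getD q 'a'
          let k := fallB st.1 p c st.2 st.2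
          let k' := if p.getD k 'a' = c then k + 1 else k
          (st.1 ++ [k'], k'))
        ([0], 0)).1.length = t + 1) ∧
      (∀ i, i ≤ t → (((List.range' 1 t).foldl
        (fun (st : List Nat × Nat) q =>
          let c := p.getD q 'a'
          let k := fallB st.1 p c st.2 st.2
          let k' := if p.getD k 'a' = c then k + 1 else k
          (st.1 ++ [k'], k'))
        ([0], 0)).1.getD i 0 = mpb p (i + 1))) ∧
      ((List.range' 1 t).foldl
        (fun (st : List Nat × Nat) q =>
          let c := p.getD q 'a'
          let k := fallB st.1 p c st.2 st.2
          let k' := if p.getD k 'a' = c then k + 1 else k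
          (st.1 ++ [k'], k'))
        ([0], 0)).2 = mpb p (t + 1) := by
  have hlen : 1 ≤ p.length := by
    cases p with
    | nil => exact absurd rfl hp
    | cons a l => simp
  intro t
  induction t with
  | zero =>
    intro _
    refine ⟨by simp, ?_, by simpa using (mpb_one p).symm⟩
    intro i hi
    interval_cases i
    simpa using (mpb_one p).symm
  | succ t ih =>
    intro ht
    obtain ⟨ihlen, ihtab, ihk⟩ := ih (by omega)
    rw [show (List.range' 1 (t + 1)) = List.range' 1 t ++ [1 + t] from by
      simpa using List.range'_concat (step := 1) (s := 1) (n := t), List.foldl_append]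
    set st := (List.range' 1 t).foldl
        (fun (st : List Nat × Nat) q =>
          let c := p.getD q 'a'
          let k := fallB st.1 p c st.2 st.2
          let k' := if p.getD k 'a' = c then k + 1 else k
          (st.1 ++ [k'], k'))
        ([0], 0) with hst
    have hq : 1 + t < p.length := by omega
    have hqt : 1 + t = t + 1 := by omega
    have hkval : fallB st.1 p (p.getD (1 + t) 'a') st.2 st.2 =
        Nat.findGreatest (fallQ p (p.getD (1 + t) 'a') (mpb p (t + 1))) (mpb p (t + 1)) := by
      rw [ihk]
      exact fallB_spec (K := t + 1)
        (fun i hi => ihtab i (by omega)) _ _ le_rfl (by have := mpb_lt (p := p) (k := t + 1) (by omega); omega)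
        (by have := mpb_lt (p := p) (k := t + 1) (by omega); omega)
    have hnew : (if p.getD (fallB st.1 p (p.getD (1 + t) 'a') st.2 st.2) 'a' = p.getD (1 + t) 'a'
        then fallB st.1 p (p.getD (1 + t) 'a') st.2 st.2 + 1
        else fallB st.1 p (p.getD (1 + t) 'a') st.2 st.2) = mpb p (t + 2) := by
      rw [hkval, hqt]
      exact (mpb_succ (q := t + 1) (by omega) (by omega)).symm
    simp only [List.foldl_cons, List.foldl_nil]
    refine ⟨by simpa using ihlen, ?_, by simpa using hnew⟩
    intro i hi
    rcases Nat.lt_or_ge i (t + 1) with hlt | hge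
    · rw [← ihlen] at hlt
      rw [List.getD_append _ _ _ _ hlt, ihtab i (by rw [ihlen] at hlt; omega)]
    · have hieq : i = t + 1 := by omega
      subst hieq
      rw [List.getD_append_right _ _ _ _ (by omega), ihlen]
      simpa using hnew

theorem prefixFun_spec (p : List Char) (hp : p ≠ []) :
    ∀ i, i < p.length → (prefixFun p).getD i 0 = mpb p (i + 1) := by
  intro i hi
  have h := (pf_inv p hp (p.length - 1) le_rfl).2.1 i (by omega)
  rw [prefixFun, if_neg hp]
  exact h

-- one automaton transition advances the greatest-overlap value
theorem aut_step (p : List Char) (hp : p ≠ []) (u : List Char) (c : Char) :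
    (let k := ovN u p
     let k₁ := if k = p.length then (prefixFun p).getD (k - 1) 0 else k
     let k₂ := fallB (prefixFun p) p c k₁ k₁
     if p.getD k₂ 'a' = c then k₂ + 1 else k₂) = ovN (u ++ [c]) p := by
  have hplen : 0 < p.length := List.length_pos_iff.mpr hp
  set k := ovN u p with hk
  have hkle : k ≤ p.length := Nat.findGreatest_le p.length
  have hksuf : p.take k <:+ u := by
    rcases Nat.eq_zero_or_pos k with h0 | hpos
    · simp [h0]
    · exact ((Nat.findGreatest_eq_iff.mp hk.symm).2.1 (by omega)).2
  have hkmax : ∀ m, m ≤ p.length → p.take m <:+ u → m ≤ k := by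
    intro m h1 h2
    exact Nat.le_findGreatest h1 ⟨h1, h2⟩
  simp only
  set k₁ := if k = p.length then (prefixFun p).getD (k - 1) 0 else k with hk₁
  have hk₁lt : k₁ < p.length := by
    rw [hk₁]
    split_ifs with hfull
    · rw [hfull, prefixFun_spec p hp (p.length - 1) (by omega),
        Nat.sub_add_cancel hplen]
      exact mpb_lt hplen
    · omega
  -- the borders of p.take k₁ are exactly the prefixes of p (shorter than p) ending u
  have hset : ∀ x, (x ≤ k₁ ∧ p.take x <:+ p.take k₁) ↔ (x < p.length ∧ p.take x <:+ u) := by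
    intro x
    rw [hk₁]
    split_ifs with hfull
    · rw [hfull, prefixFun_spec p hp (p.length - 1) (by omega), Nat.sub_add_cancel hplen]
      have hpu : p.take p.length <:+ u := by
        rw [← hfull]; exact hksuf
      constructor
      · rintro ⟨hx1, hx2⟩
        have hxlt : x < p.length := lt_of_le_of_lt hx1 (mpb_lt hplen)
        exact ⟨hxlt, ((border_chain le_rfl hplen hxlt).mpr ⟨hx1, hx2⟩).trans hpu⟩
      · rintro ⟨hx1, hx2⟩
        have : p.take x <:+ p.take p.length :=
          (chain_suffix le_rfl hpu (le_of_lt hx1)).mp hx2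
        exact (border_chain le_rfl hplen hx1).mp this
    · constructor
      · rintro ⟨hx1, hx2⟩
        refine ⟨by omega, ?_⟩
        exact hx2.trans hksuf
      · rintro ⟨hx1, hx2⟩
        have hxk : x ≤ k := hkmax x (by omega) hx2
        exact ⟨hxk, (chain_suffix hkle hksuf hxk).mp hx2⟩
  rw [fallB_spec (K := p.length) (fun i hi => prefixFun_spec p hp i hi) k₁ k₁ le_rfl
    (le_of_lt hk₁lt) (le_of_lt hk₁lt)]
  refine (fg_extend hk₁lt ?_).symm
  intro x
  constructor
  · rintro ⟨hx1, -, hsuf⟩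
    have hxlt : x < p.length := by omega
    rw [take_snoc_getD hxlt] at hsuf
    obtain ⟨hxc, hsuf'⟩ := suffix_snoc_suffix_snoc.mp hsuf
    obtain ⟨h1, h2⟩ := (hset x).mpr ⟨hxlt, hsuf'⟩
    exact ⟨h1, h2, hxc⟩
  · rintro ⟨hx1, hsuf, hxc⟩
    have hxlt : x < p.length := lt_of_le_of_lt hx1 hk₁lt
    have hxu : p.take x <:+ u := ((hset x).mp ⟨hx1, hsuf⟩).2
    refine ⟨by omega, by omega, ?_⟩
    rw [take_snoc_getD hxlt, hxc]
    exact suffix_snoc_suffix_snoc.mpr ⟨rfl, hxu⟩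

-- B's overlap is the greatest candidate overlap
theorem ovB_eq (s1 p : List Char) : ovB s1 p = ovN s1 p := by
  rw [ovB]
  by_cases hp : p = []
  · subst hp
    simp [ovN, Bm]
  · rw [if_neg hp]
    induction s1 using List.reverseRecOn with
    | nil =>
      simp only [List.foldl_nil]
      symm
      apply Nat.findGreatest_eq_iff.mpr
      refine ⟨Nat.zero_le _, by simp, ?_⟩
      rintro n hn - ⟨hn1, hn2⟩
      have := hn2.length_le
      simp only [List.length_take, List.length_nil] at this
      omega
    | append_singleton u c ih =>
      rw [List.foldl_append, List.foldl_cons, List.foldl_nil, ih]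
      exact aut_step p hp u c

-- ---------- A's quadratic overlap scan is the same greatest candidate ----------

theorem ovA_fold (s1 p : List Char) :
    ∀ t, t ≤ min s1.length p.length →
      (List.range t).foldl
        (fun (maxOv : Int) (k : Nat) =>
          if PySem.List.slice s1 (some (-(1 + (k : Int)))) none =
              PySem.List.slice p none (some (1 + (k : Int))) then
            (if 1 + (k : Int) > maxOv then 1 + (k : Int) else maxOv)
          else maxOv) 0
      = ((Nat.findGreatest (fun m => s1.drop (s1.length - m) = p.take m) t : Nat) : Int) := by
  intro t
  induction t with
  | zero =>
    intro _
    simp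
  | succ t ih =>
    intro ht
    rw [List.range_succ, List.foldl_append, List.foldl_cons, List.foldl_nil, ih (by omega)]
    have hcast : 1 + (t : Int) = ((t + 1 : Nat) : Int) := by push_cast; ring
    have hslice1 : PySem.List.slice s1 (some (-(1 + (t : Int)))) none =
        s1.drop (s1.length - (t + 1)) := by
      rw [hcast]
      exact PySem.List.slice_from_neg_natCast s1 (t + 1) (by omega)
    have hslice2 : PySem.List.slice p none (some (1 + (t : Int))) = p.take (t + 1) := by
      rw [hcast]
      exact PySem.List.slice_to_natCast p (t + 1)
    rw [hslice1, hslice2, Nat.findGreatest_succ]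
    have hle : Nat.findGreatest (fun m => s1.drop (s1.length - m) = p.take m) t ≤ t :=
      Nat.findGreatest_le t
    by_cases hP : s1.drop (s1.length - (t + 1)) = p.take (t + 1)
    · rw [if_pos hP, if_pos hP, if_pos (by omega), hcast]
    · rw [if_neg hP, if_neg hP]

theorem ovA_eq (s1 p : List Char) : ovA s1 p = ((ovB s1 p : Nat) : Int) := by
  rw [ovB_eq, ovA]
  have hmin : min (s1.length : Int) (p.length : Int) = ((min s1.length p.length : Nat) : Int) := by
    push_cast; rfl
  rw [hmin]
  have hrange : PySem.List.pyRange 1 (((min s1.length p.length : Nat) : Int) + 1) 1 =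
      (List.range (min s1.length p.length)).map (fun (k : Nat) => 1 + (k : Int)) := by
    rw [PySem.List.pyRange_one,
      show ((min s1.length p.length : Nat) : Int) + 1 - 1 = ((min s1.length p.length : Nat) : Int) from by ring,
      Int.toNat_natCast]
  rw [hrange, List.foldl_map, ovA_fold s1 p _ le_rfl]
  congr 1
  apply fgCongr
  intro x hx
  constructor
  · rintro ⟨hxm, hdrop⟩
    have hxp : x ≤ p.length := by omega
    refine ⟨hxp, hxp, ?_⟩
    rw [← hdrop]
    exact List.drop_suffix _ _
  · rintro ⟨hxp, -, hsuf⟩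
    have htl : (p.take x).length = x := by simp [hxp]
    have hxs : x ≤ s1.length := by
      have := hsuf.length_le
      omega
    refine ⟨by omega, ?_⟩
    obtain ⟨w, hw⟩ := hsuf
    rw [← hw]
    have hwl : (w ++ p.take x).length - x = w.length := by
      simp [htl]
    rw [hwl, List.drop_left]

-- ---------- the greedy rounds coincide ----------

theorem eraseIdx_set_same (s : List (List Char)) (j : Nat) (x y : List Char) :
    (s.set j x).eraseIdx j = (s.set j y).eraseIdx j := by
  have h : ∀ z : List Char, (s.set j z).eraseIdx j = s.take j ++ s.drop (j + 1) := by
    intro z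
    rw [List.eraseIdx_eq_take_drop_succ]
    have ht : (s.set j z).take j = s.take j := by
      rw [List.take_set, List.set_eq_of_length_le (by simp)]
    have hd : (s.set j z).drop (j + 1) = s.drop (j + 1) := by
      simp [List.drop_set]
    rw [ht, hd]
  rw [h x, h y]

theorem map_range_set (s : List (List Char)) (i : Nat) (m : List Char) :
    (List.range s.length).map (fun k => if k = i then m else s.getD k []) = s.set i m := by
  apply List.ext_getElem
  · simp
  · intro k h1 h2
    simp only [List.getElem_map, List.getElem_range, List.getElem_set]
    have hk : k < s.length := by simpa using h2
    by_cases h : k = i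
    · subst h; simp
    · rw [if_neg h, if_neg (fun hh => h hh.symm), List.getD_eq_getElem s [] hk]

theorem filterMap_range_eraseIdx {α : Type} (n j : Nat) (hj : j < n) (g : Nat → α) :
    (List.range n).filterMap (fun k => if k = j then none else some (g k)) =
      ((List.range n).map g).eraseIdx j := by
  induction n with
  | zero => omega
  | succ n ih =>
    rw [List.range_succ, List.filterMap_append, List.map_append]
    rcases Nat.lt_or_ge j n with hlt | hge
    · rw [ih hlt, List.eraseIdx_append_of_lt_length (by simpa using hlt)]
      simp [Nat.ne_of_gt hlt]
    · have hj' : j = n := by omega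
      subst hj'
      rw [List.eraseIdx_append_of_length_le (by simp)]
      have h1 : (List.range j).filterMap (fun k => if k = j then none else some (g k)) =
          (List.range j).map g := by
        rw [List.filterMap_congr (g := fun k => some (g k)) (by
          intro k hk
          have : k < j := by simpa using hk
          rw [if_neg (by omega)])]
        simp
      simp [h1]

-- the invariant tying A's (max, best_pair, superstring) to B's (o, bi, bj) during the scan
def RelSt (s : List (List Char)) (a : Int × (Nat × Nat) × List Char) (b : Nat × Nat × Nat) : Prop :=
  a.1 = ((b.1 : Nat) : Int) ∧ a.2.1 = (b.2.1, b.2.2) ∧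
  (b.1 = 0 → a.2.2 = [] ∧ b.2.1 = 0 ∧ b.2.2 = 0) ∧
  (0 < b.1 → a.2.2 = s.getD b.2.1 [] ++ (s.getD b.2.2 []).drop b.1 ∧
    b.2.1 ≠ b.2.2 ∧ b.2.1 < s.length ∧ b.2.2 < s.length)

theorem foldl_rel {α β γ : Type} (R : α → β → Prop) (fa : α → γ → α) (fb : β → γ → β)
    (P : γ → Prop) (hstep : ∀ a b x, P x → R a b → R (fa a x) (fb b x)) :
    ∀ (l : List γ), (∀ x ∈ l, P x) → ∀ a b, R a b → R (l.foldl fa a) (l.foldl fb b) := by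
  intro l
  induction l with
  | nil => intro _ a b h; exact h
  | cons x xs ih =>
    intro hl a b h
    rw [List.foldl_cons, List.foldl_cons]
    exact ih (fun y hy => hl y (List.mem_cons_of_mem x hy)) _ _
      (hstep a b x (hl x List.mem_cons_self) h)

theorem rel_step (s : List (List Char)) (i j : Nat) (hi : i < s.length) (hj : j < s.length)
    (a : Int × (Nat × Nat) × List Char) (b : Nat × Nat × Nat) (h : RelSt s a b) :
    RelSt s
      (if i ≠ j then
        (if ovA (s.getD i []) (s.getD j []) > a.1 then
          (ovA (s.getD i []) (s.getD j []), (i, j),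
            s.getD i [] ++ PySem.List.slice (s.getD j []) (some (ovA (s.getD i []) (s.getD j []))) none)
        else a)
      else a)
      (if i ≠ j then
        (if ovB (s.getD i []) (s.getD j []) > b.1 then (ovB (s.getD i []) (s.getD j []), i, j) else b)
      else b) := by
  by_cases hij : i = j
  · simp only [hij, ne_eq, not_true_eq_false, if_false]
    exact h
  · rw [if_pos hij, if_pos hij, ovA_eq]
    set v := ovB (s.getD i []) (s.getD j []) with hv
    by_cases hgt : v > b.1
    · rw [if_pos (by rw [h.1]; exact_mod_cast hgt), if_pos hgt]
      have hvpos : 0 < v := by omega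
      refine ⟨rfl, rfl, by omega, fun _ => ⟨?_, hij, hi, hj⟩⟩
      dsimp only
      rw [PySem.List.slice_from_natCast]
    · rw [if_neg (by rw [h.1]; exact_mod_cast hgt), if_neg hgt]
      exact h

theorem step_eq (s : List (List Char)) (hs : s ≠ []) : stepA s = stepB s := by
  have hlen : 0 < s.length := List.length_pos_iff.mpr hs
  rw [stepA, stepB]
  simp only
  set stA := (List.range s.length).foldl
      (fun (st : Int × (Nat × Nat) × List Char) i =>
        (List.range s.length).foldl
          (fun st j =>
            if i ≠ j then
              let ol := ovA (s.getD i []) (s.getD j [])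
              if ol > st.1 then
                (ol, (i, j), s.getD i [] ++ PySem.List.slice (s.getD j []) (some ol) none)
              else st
            else st) st)
      (0, (0, 0), []) with hstA
  set stB := (List.range s.length).foldl
      (fun (st : Nat × Nat × Nat) i =>
        (List.range s.length).foldl
          (fun st j =>
            if i ≠ j then
              let v := ovB (s.getD i []) (s.getD j [])
              if v > st.1 then (v, i, j) else st
            else st) st)
      (0, 0, 0) with hstB
  have hrel : RelSt s stA stB := by
    rw [hstA, hstB]
    refine foldl_rel (RelSt s) _ _ (fun i => i < s.length) ?_ _
      (fun x hx => List.mem_range.mp hx) _ _ ⟨rfl, rfl, fun _ => ⟨rfl, rfl, rfl⟩, by omega⟩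
    intro a b i hi hab
    exact foldl_rel (RelSt s) _ _ (fun j => j < s.length)
      (fun a b j hj hab => rel_step s i j hi hj a b hab) _
      (fun x hx => List.mem_range.mp hx) a b hab
  obtain ⟨h1, h2, h3, h4⟩ := hrel
  have hbj : stB.2.2 < s.length := by
    rcases Nat.eq_zero_or_pos stB.1 with h0 | hpos
    · rw [(h3 h0).2.2]; exact hlen
    · exact (h4 hpos).2.2.2
  rw [filterMap_range_eraseIdx s.length stB.2.2 hbj, map_range_set, h2]
  rcases Nat.eq_zero_or_pos stB.1 with h0 | hpos
  · obtain ⟨ha, hbi0, hbj0⟩ := h3 h0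
    rw [ha, hbi0, hbj0]
    exact eraseIdx_set_same s 0 _ _
  · rw [(h4 hpos).1]

theorem loop_eq : ∀ (fuel : Nat) (s : List (List Char)), loopA fuel s = loopB fuel s := by
  intro fuel
  induction fuel with
  | zero => intro s; rfl
  | succ f ih =>
    intro s
    rw [loopA, loopB]
    by_cases h : 1 < s.length
    · rw [if_pos h, if_pos h, step_eq s (by intro h0; rw [h0] at h; simp at h)]
      exact ih _
    · rw [if_neg h, if_neg h]

theorem genomes_eq (seqs : List String) : genome_assembly seqs = genome_assembly_alt seqs := by
  rw [genome_assembly, genome_assembly_alt]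
  simp only [PySem.List.pyGetD_zero, loop_eq]

-- ===== VERDICT (by name: the statement is the Claim_ definition above) =====
theorem genome_assembly_spec : Claim_equal_genome_assembly := by
  intro seqs _ _
  unfold Spec_genome_assembly
  exact genomes_eq seqs
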